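-- pv_equiv track=rewrite | github.com/j0kerZ/RiSk-S--FCode | SAP/scripts/SAP/processors/nlp.py | email
-- ===== SOURCE A (Python) =====
-- def email(s):
--     ans = 0
--     i = 0
--     while i < len(s):
--         if s[i] == '@':
--             has_dot = False
--             for j in range(i + 1, len(s)):
--                 if(s[j] == '.' and j != len(s) - 1):
--                     has_dot = True
--                 if(s[j] == ' ' or j == len(s) - 1):
--                     if has_dot:
--                         ans += 1
--                     i = j
--                     break
--         i += 1
--     return ans
-- ===== SOURCE B (Python) =====
-- def email(s):
--     # single flat pass with two running flags instead of nested index scans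
--     ans = 0
--     seen_at = False
--     has_dot = False
--     n = len(s)
--     for i, c in enumerate(s):
--         if c == ' ':
--             if seen_at and has_dot:
--                 ans += 1
--             seen_at = False
--             has_dot = False
--         elif c == '@':
--             seen_at = True
--         elif c == '.':
--             if seen_at and i != n - 1:
--                 has_dot = True
--     if seen_at and has_dot:
--         ans += 1
--     return ans
-- ===== Notes on version B (the rewrite author's own statement) =====
-- stated objective: faster
-- what changed: Replaced A's while-loop, which restarts a nested forward dot-scan with an index jump at every at-sign, by a single flat pass over the characters maintaining two running flags seen_at/has_dot, counting at each space and once at the end.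
import Mathlib
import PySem

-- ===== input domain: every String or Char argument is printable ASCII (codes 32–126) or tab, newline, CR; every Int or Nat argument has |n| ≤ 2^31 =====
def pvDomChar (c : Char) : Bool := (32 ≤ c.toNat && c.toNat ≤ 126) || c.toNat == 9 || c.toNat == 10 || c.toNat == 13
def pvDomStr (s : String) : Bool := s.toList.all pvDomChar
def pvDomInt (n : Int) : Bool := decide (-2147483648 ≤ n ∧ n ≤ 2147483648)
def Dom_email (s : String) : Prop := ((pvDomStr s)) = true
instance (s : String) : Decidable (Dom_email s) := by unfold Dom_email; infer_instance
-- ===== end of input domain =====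

-- B replaces A's nested inner scan and index jump by one flat pass with two running flags (different decomposition, same O(n) cost).

-- ===== PORT A =====
-- A's while loop over indices is transliterated as structural recursion on the
-- suffix list: s[i]/s[j] is the head of the current suffix, the test
-- `j == len(s) - 1` is `rest = []`, and the jump `i = j; i += 1` is continuing
-- the outer loop on the suffix returned by the inner scan.
-- inner for-loop of A: scan from i+1 carrying has_dot; returns the contribution
-- to ans and the suffix after the break position (or (0, []) when it never breaks).
def emailInner : List Char → Bool → Int × List Char
  | [], _ => (0, [])
  | c :: rest, hd =>
    let hd' := if c = '.' ∧ rest ≠ [] then true else hd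
    if c = ' ' ∨ rest = [] then ((if hd' then 1 else 0), rest)
    else emailInner rest hd'

-- termination helper for the outer loop (cited in decreasing_by)
theorem emailInner_len : ∀ (r : List Char) (hd : Bool), (emailInner r hd).2.length ≤ r.length := by
  intro r
  induction r with
  | nil => intro hd; simp [emailInner]
  | cons c rest IH =>
    intro hd
    simp only [emailInner]
    split
    · simp
    · exact le_trans (IH _) (by simp)

-- outer while-loop of A
def emailGo : List Char → Int
  | [] => 0
  | c :: rest =>
    if c = '@' then
      let p := emailInner rest false
      p.1 + emailGo p.2
    else emailGo rest
termination_by l => l.length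
decreasing_by
  · have := emailInner_len rest false; simp; omega
  · simp

def email (s : String) : Int := emailGo s.toList

-- ===== PORT B =====
-- B's flat for-loop with flags, as structural recursion over the characters:
-- the state (seen_at, has_dot) is threaded through; `i != n - 1` is `rest ≠ []`,
-- and the final `if seen_at and has_dot` after the loop is the base case.
def emailAltGo : List Char → Bool → Bool → Int
  | [], sa, hd => if sa ∧ hd then 1 else 0
  | c :: rest, sa, hd =>
    if c = ' ' then (if sa ∧ hd then 1 else 0) + emailAltGo rest false false
    else if c = '@' then emailAltGo rest true hd
    else if c = '.' then emailAltGo rest sa (if sa ∧ rest ≠ [] then true else hd)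
    else emailAltGo rest sa hd

def email_alt (s : String) : Int := emailAltGo s.toList false false

-- ===== PRECONDITION & SPEC =====
def Spec_email (s : String) (out : Int) : Prop := out = email_alt s
instance (s : String) (out : Int) : Decidable (Spec_email s out) := by unfold Spec_email; infer_instance

-- ===== CLAIM (what is proved, stated in full; the proofs are below) =====
def Claim_equal_email : Prop := ∀ (s : String), Dom_email s → Spec_email s (email s)

-- ===== LEMMAS AND PROOFS =====

-- After an '@' is seen, B's pass with seen_at = true computes exactly A's inner
-- scan's contribution followed by a fresh-state pass on the rest.  The side
-- condition records that the inner scan is only entered on [] with hd = false.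
theorem altGo_inner : ∀ (r : List Char) (hd : Bool), (r = [] → hd = false) →
    emailAltGo r true hd = (emailInner r hd).1 + emailAltGo (emailInner r hd).2 false false := by
  intro r
  induction r with
  | nil => intro hd h; simp [h rfl, emailAltGo, emailInner]
  | cons c rest IH =>
    intro hd _
    by_cases hsp : c = ' '
    · simp [emailAltGo, emailInner, hsp]
    · by_cases hat : c = '@'
      · by_cases hr : rest = []
        · subst hr; simp [emailAltGo, emailInner, hat]
        · simp only [emailAltGo, emailInner, if_neg hsp, if_pos hat]
          have : ¬ (c = '.' ∧ rest ≠ []) := by simp [hat]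
          simp only [if_neg this, if_neg (by simp [hsp, hr] : ¬ (c = ' ' ∨ rest = []))]
          exact IH hd (fun h => absurd h hr)
      · by_cases hdot : c = '.'
        · by_cases hr : rest = []
          · subst hr; simp [emailAltGo, emailInner, hdot]
          · simp only [emailAltGo, emailInner, if_neg hsp, if_neg hat, if_pos hdot]
            have h1 : (c = '.' ∧ rest ≠ []) := ⟨hdot, hr⟩
            simp only [if_pos h1, if_neg (by simp [hsp, hr] : ¬ (c = ' ' ∨ rest = []))]
            have h2 : (if True ∧ rest ≠ [] then true else hd) = true := by simp [hr]
            simp only [true_and, if_pos hr]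
            exact IH true (fun h => absurd h hr)
        · by_cases hr : rest = []
          · subst hr; simp [emailAltGo, emailInner, hdot]
          · simp only [emailAltGo, emailInner, if_neg hsp, if_neg hat, if_neg hdot]
            have : ¬ (c = '.' ∧ rest ≠ []) := by simp [hdot]
            simp only [if_neg this, if_neg (by simp [hsp, hr] : ¬ (c = ' ' ∨ rest = []))]
            exact IH hd (fun h => absurd h hr)

theorem go_eq_altGo_aux : ∀ (n : Nat) (l : List Char), l.length ≤ n → emailGo l = emailAltGo l false false := by
  intro n
  induction n with
  | zero =>
    intro l hl
    have : l = [] := List.eq_nil_of_length_eq_zero (Nat.le_zero.mp hl)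
    subst this; simp [emailGo, emailAltGo]
  | succ n IH =>
    intro l hl
    match l with
    | [] => simp [emailGo, emailAltGo]
    | c :: rest =>
      have hrest : rest.length ≤ n := by simpa using hl
      by_cases h : c = '@'
      · have hsp : c ≠ ' ' := by rw [h]; decide
        simp only [emailGo, emailAltGo, if_neg hsp, if_pos h]
        rw [altGo_inner rest false (fun _ => rfl)]
        rw [IH (emailInner rest false).2 (le_trans (emailInner_len rest false) hrest)]
      · simp only [emailGo, if_neg h]
        rw [IH rest hrest]
        by_cases hsp : c = ' '
        · simp [emailAltGo, hsp]
        · by_cases hdot : c = '.'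
          · simp [emailAltGo, hdot]
          · simp [emailAltGo, hsp, h, hdot]

-- ===== VERDICT (by name: the statement is the Claim_ definition above) =====
theorem email_spec : Claim_equal_email := by
  intro s _
  unfold Spec_email email email_alt
  exact go_eq_altGo_aux s.toList.length s.toList le_rfl
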